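-- pv_equiv track=rewrite | github.com/santule/indelmip | scripts/score_indel.py | indel_events
-- ===== SOURCE A (Python) =====
-- def indel_events(str1,str2):
--     dis = 0
--     prev_dis = 0
--
--     for i in range(0,len(str1)):
--         curr_dis = int(str1[i]) - int(str2[i])
--
--         if curr_dis != 0 and curr_dis != prev_dis:
--             dis += 1
--         prev_dis = curr_dis
--
--     return dis
-- ===== SOURCE B (Python) =====
-- def indel_events(str1, str2):
--     # Count runs of equal nonzero diffs by inclusion-exclusion:
--     # (number of nonzero positions) - (number of adjacent equal nonzero pairs).
--     diffs = [int(str1[i]) - int(str2[i]) for i in range(len(str1))]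
--     nonzero = sum(1 for d in diffs if d != 0)
--     repeats = sum(1 for prev, cur in zip(diffs, diffs[1:]) if cur != 0 and cur == prev)
--     return nonzero - repeats
-- ===== Notes on version B (the rewrite author's own statement) =====
-- stated objective: alternative
-- what changed: A detects run starts in a single stateful scan with a prev_dis variable; B uses an inclusion-exclusion counting scheme: it counts all nonzero diff positions and subtracts the adjacent equal nonzero pairs, so each run contributes length minus (length-1) = 1, with no boundary-detection state at all.
import Mathlib
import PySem

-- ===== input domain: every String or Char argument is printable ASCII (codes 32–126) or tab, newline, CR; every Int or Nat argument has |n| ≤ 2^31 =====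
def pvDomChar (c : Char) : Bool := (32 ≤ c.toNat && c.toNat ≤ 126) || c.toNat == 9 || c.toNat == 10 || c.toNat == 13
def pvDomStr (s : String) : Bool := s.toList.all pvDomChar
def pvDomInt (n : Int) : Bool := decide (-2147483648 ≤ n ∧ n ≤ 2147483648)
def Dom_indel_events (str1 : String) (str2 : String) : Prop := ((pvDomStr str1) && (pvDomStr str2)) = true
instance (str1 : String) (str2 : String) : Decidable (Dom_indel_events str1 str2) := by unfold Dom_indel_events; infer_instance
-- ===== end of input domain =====

-- B replaces A's stateful run-boundary scan by inclusion-exclusion: count nonzero diffs, subtract adjacent equal nonzero pairs (alternative; same cost).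

-- int(s) for the one-character string s = str[i]; exact under Pre_ (digit chars).
def pvCharInt (c : Char) : Int := (PySem.Int.ofChars? [c]).getD 0

-- ===== PORT A =====
def indel_events (str1 : String) (str2 : String) : Int :=
  ((PySem.List.pyRange 0 (PySem.Str.len str1) 1).foldl
    (fun (st : Int × Int) i =>
      let curr_dis := pvCharInt (PySem.List.pyGetD str1.toList i ' ') -
                      pvCharInt (PySem.List.pyGetD str2.toList i ' ')
      ((if curr_dis ≠ 0 ∧ curr_dis ≠ st.2 then st.1 + 1 else st.1), curr_dis))
    (0, 0)).1

-- ===== PORT B =====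
-- diffs[1:] is ported as diffs.drop 1 (exact for this nonneg in-range slice).
def indel_events_alt (str1 : String) (str2 : String) : Int :=
  let diffs := (PySem.List.pyRange 0 (PySem.Str.len str1) 1).map
    (fun i => pvCharInt (PySem.List.pyGetD str1.toList i ' ') -
              pvCharInt (PySem.List.pyGetD str2.toList i ' '))
  let nonzero : Int := ((diffs.filter (fun d => d ≠ 0)).length : Int)
  let repeats : Int := (((diffs.zip (diffs.drop 1)).filter
      (fun pc => pc.2 ≠ 0 ∧ pc.2 = pc.1)).length : Int)
  nonzero - repeats

-- ===== PRECONDITION & SPEC =====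
-- Pre_ excludes exactly the raising inputs: IndexError when str2 is shorter than str1,
-- ValueError when a scanned character of either string is not a decimal digit.
def Pre_indel_events (str1 : String) (str2 : String) : Prop :=
  str1.toList.length ≤ str2.toList.length ∧
  str1.toList.all PySem.Chars.isdigit = true ∧
  (str2.toList.take str1.toList.length).all PySem.Chars.isdigit = true
instance (str1 : String) (str2 : String) : Decidable (Pre_indel_events str1 str2) := by
  unfold Pre_indel_events; infer_instance
def pvWitness_indel_events : String × String := ("1102", "1013")

def Spec_indel_events (str1 : String) (str2 : String) (out : Int) : Prop := out = indel_events_alt str1 str2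
instance (str1 : String) (str2 : String) (out : Int) : Decidable (Spec_indel_events str1 str2 out) := by unfold Spec_indel_events; infer_instance

-- ===== CLAIM (what is proved, stated in full; the proofs are below) =====
def Claim_equal_indel_events : Prop := ∀ (str1 : String) (str2 : String), Dom_indel_events str1 str2 → Pre_indel_events str1 str2 → Spec_indel_events str1 str2 (indel_events str1 str2)

-- ===== LEMMAS AND PROOFS =====

-- Number of adjacent pairs in (p :: ds) whose second component is nonzero and repeats the first.
def pvRp (p : Int) : List Int → Int
  | [] => 0
  | d :: ds => (if d ≠ 0 ∧ d = p then 1 else 0) + pvRp d ds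

-- A's fold = accumulator + (nonzero count) - (repeat count seeded with prev).
lemma pvFold_eq (ds : List Int) (a p : Int) :
    ((ds.foldl
        (fun (st : Int × Int) d =>
          ((if d ≠ 0 ∧ d ≠ st.2 then st.1 + 1 else st.1), d)) (a, p)).1)
      = a + ((ds.filter (fun d => d ≠ 0)).length : Int) - pvRp p ds := by
  induction ds generalizing a p with
  | nil => simp [pvRp]
  | cons d ds ih =>
    simp only [List.foldl_cons, ih, pvRp, List.filter_cons]
    by_cases hd : d = 0
    · simp [hd]
    · by_cases hp : d = p
      · subst hp; simp [hd]; ring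
      · simp [hd, hp]; ring

-- B's zip-pair repeat count equals pvRp seeded with the list's own head.
lemma pvZip_eq_Rp (d : Int) (ds : List Int) :
    ((((d :: ds).zip ds).filter (fun pc => pc.2 ≠ 0 ∧ pc.2 = pc.1)).length : Int)
      = pvRp d ds := by
  induction ds generalizing d with
  | nil => simp [pvRp]
  | cons e ds ih =>
    simp only [List.zip_cons_cons, List.filter_cons, pvRp, ← ih e]
    by_cases he : e = 0
    · simp [he]
    · by_cases hd : e = d
      · subst hd; simp [he]; ring
      · simp [he, hd]

-- The two ports agree on any diff list.
lemma pvMain (ds : List Int) :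
    ((ds.foldl
        (fun (st : Int × Int) d =>
          ((if d ≠ 0 ∧ d ≠ st.2 then st.1 + 1 else st.1), d)) (0, 0)).1)
      = ((ds.filter (fun d => d ≠ 0)).length : Int)
        - (((ds.zip (ds.drop 1)).filter (fun pc => pc.2 ≠ 0 ∧ pc.2 = pc.1)).length : Int) := by
  rw [pvFold_eq]
  cases ds with
  | nil => simp [pvRp]
  | cons d ds =>
    rw [show (d :: ds).drop 1 = ds from rfl, pvZip_eq_Rp]
    simp only [pvRp]
    by_cases hd : d = 0
    · simp [hd]
    · simp [hd]

-- ===== VERDICT (by name: the statement is the Claim_ definition above) =====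
theorem indel_events_spec : Claim_equal_indel_events := by
  intro str1 str2 _ _
  unfold Spec_indel_events indel_events indel_events_alt
  rw [← List.foldl_map
        (f := fun i => pvCharInt (PySem.List.pyGetD str1.toList i ' ') -
                       pvCharInt (PySem.List.pyGetD str2.toList i ' '))
        (g := fun (st : Int × Int) d => ((if d ≠ 0 ∧ d ≠ st.2 then st.1 + 1 else st.1), d))]
  exact pvMain _
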